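-- pv_equiv track=rewrite | github.com/akhileshpoojary-arch/legal_case_scraper | utils/company_augment.py | _single_letter_run_variants
-- ===== SOURCE A (Python) =====
-- def _single_letter_run_variants(tokens: list[str]) -> list[list[str]]:
--     """Join adjacent initials, e.g. ``M K NARAYAN`` -> ``MK NARAYAN``."""
--     out: list[list[str]] = []
--     idx = 0
--     while idx < len(tokens):
--         if len(tokens[idx]) != 1 or not tokens[idx].isalpha():
--             idx += 1
--             continue
--         end = idx + 1
--         while end < len(tokens) and len(tokens[end]) == 1 and tokens[end].isalpha():
--             end += 1
--         run_len = end - idx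
--         if run_len >= 2:
--             run = tokens[idx:end]
--             out.append(tokens[:idx] + ["".join(run)] + tokens[end:])
--             out.append(tokens[:idx] + [".".join(run) + "."] + tokens[end:])
--         idx = end
--     return out
-- ===== SOURCE B (Python) =====
-- def _single_letter_run_variants(tokens: list[str]) -> list[list[str]]:
--     """Join adjacent initials, e.g. ``M K NARAYAN`` -> ``MK NARAYAN``."""
--     # Declarative interval enumeration: try EVERY interval [s, e) of length >= 2
--     # and keep exactly those that are maximal runs of single-letter tokens
--     # (all members are initials, and neither neighbour is one).  Each kept
--     # interval contributes its two variants; s ascending reproduces A's order,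
--     # since maximal runs are pairwise disjoint and unique per start.
--     n = len(tokens)
--
--     def ini(t: str) -> bool:
--         return len(t) == 1 and t.isalpha()
--
--     out: list[list[str]] = []
--     for s in range(n):
--         for e in range(s + 2, n + 1):
--             if ((s == 0 or not ini(tokens[s - 1]))
--                     and (e == n or not ini(tokens[e]))
--                     and all(ini(t) for t in tokens[s:e])):
--                 run = tokens[s:e]
--                 out.append(tokens[:s] + ["".join(run)] + tokens[e:])
--                 out.append(tokens[:s] + [".".join(run) + "."] + tokens[e:])
--     return out
-- ===== Notes on version B (the rewrite author's own statement) =====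
-- stated objective: alternative
-- what changed: Replaces A's stateful linear scan (nested while loops walking an index and extending each run) by a declarative brute-force enumeration of all O(n^2) candidate intervals, keeping an interval iff a local maximality predicate holds (all members initials, neither neighbour one); no scanning state is carried at all.
import Mathlib
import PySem

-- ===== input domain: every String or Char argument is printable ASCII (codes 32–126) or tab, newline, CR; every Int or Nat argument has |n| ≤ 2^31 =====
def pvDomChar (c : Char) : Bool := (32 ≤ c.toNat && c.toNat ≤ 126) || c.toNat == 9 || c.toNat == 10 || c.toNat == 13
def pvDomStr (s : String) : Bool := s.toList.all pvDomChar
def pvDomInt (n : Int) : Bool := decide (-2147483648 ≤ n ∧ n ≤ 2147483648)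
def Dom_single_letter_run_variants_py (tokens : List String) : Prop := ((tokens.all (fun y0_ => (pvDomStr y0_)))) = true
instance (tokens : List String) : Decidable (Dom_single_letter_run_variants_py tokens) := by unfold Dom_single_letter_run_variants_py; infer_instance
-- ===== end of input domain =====

-- B is an alternative algorithm: A walks an index with nested while loops, extending each
-- run as it is met; B enumerates ALL candidate intervals [s, e) of length >= 2 and keeps
-- exactly those satisfying a local maximality predicate, carrying no scan state; equal
-- return value, proved on the stated input domain.

-- shared helper: Python 'len(t) == 1 and t.isalpha()'
def pvIsInit (t : String) : Bool := (PySem.Str.len t == 1) && PySem.Str.strIsalpha t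

-- ===== PORT A =====
-- inner 'while end < len(tokens) and len(tokens[end]) == 1 and tokens[end].isalpha(): end += 1'
def pvFindEnd (tokens : List String) (e : Nat) : Nat :=
  if h : e < tokens.length then
    if pvIsInit tokens[e] then pvFindEnd tokens (e + 1) else e
  else e
termination_by tokens.length - e

theorem pvFindEnd_ge (tokens : List String) (e : Nat) : e ≤ pvFindEnd tokens e := by
  unfold pvFindEnd
  split
  · split
    · have := pvFindEnd_ge tokens (e + 1); omega
    · omega
  · omega
termination_by tokens.length - e

-- outer while loop of A; slices tokens[:idx], tokens[idx:end], tokens[end:] are exact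
-- take/drop since all indices here are natural and in range
def pvALoop (tokens : List String) (idx : Nat) (out : List (List String)) : List (List String) :=
  if h : idx < tokens.length then
    if ¬ pvIsInit tokens[idx] then pvALoop tokens (idx + 1) out
    else
      let e := pvFindEnd tokens (idx + 1)
      let out' :=
        if e - idx ≥ 2 then
          let run := (tokens.drop idx).take (e - idx)
          (out ++ [tokens.take idx ++ [PySem.Str.join "" run] ++ tokens.drop e]) ++
            [tokens.take idx ++ [PySem.Str.join "." run ++ "."] ++ tokens.drop e]
        else out
      pvALoop tokens e out'
  else out
termination_by tokens.length - idx
decreasing_by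
  · omega
  · have := pvFindEnd_ge tokens (idx + 1); omega

def single_letter_run_variants_py (tokens : List String) : List (List String) :=
  pvALoop tokens 0 []

-- ===== PORT B =====
-- '(s == 0 or not ini(tokens[s-1])) and (e == n or not ini(tokens[e])) and all(ini(t) for t in tokens[s:e])'
-- (the getD default "" is a formality: each index is read only when in range,
-- exactly as Python's short-circuit guards it)
def pvQual (tokens : List String) (n s e : Nat) : Bool :=
  (s == 0 || !pvIsInit (tokens.getD (s - 1) "")) &&
  (e == n || !pvIsInit (tokens.getD e "")) &&
  ((tokens.drop s).take (e - s)).all pvIsInit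

-- 'for s in range(n): for e in range(s+2, n+1): if qual: append the two variants'
def single_letter_run_variants_py_alt (tokens : List String) : List (List String) :=
  let n := tokens.length
  (List.range n).foldl
    (fun out s =>
      (List.range' (s + 2) (n + 1 - (s + 2))).foldl
        (fun out e =>
          if pvQual tokens n s e then
            let run := (tokens.drop s).take (e - s)
            (out ++ [tokens.take s ++ [PySem.Str.join "" run] ++ tokens.drop e]) ++
              [tokens.take s ++ [PySem.Str.join "." run ++ "."] ++ tokens.drop e]
          else out)
        out)
    []

-- ===== PRECONDITION & SPEC =====
def Spec_single_letter_run_variants_py (tokens : List String) (out : List (List String)) : Prop := out = single_letter_run_variants_py_alt tokens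
instance (tokens : List String) (out : List (List String)) : Decidable (Spec_single_letter_run_variants_py tokens out) := by unfold Spec_single_letter_run_variants_py; infer_instance

-- ===== CLAIM (what is proved, stated in full; the proofs are below) =====
def Claim_equal_single_letter_run_variants_py : Prop := ∀ (tokens : List String), Dom_single_letter_run_variants_py tokens → Spec_single_letter_run_variants_py tokens (single_letter_run_variants_py tokens)

-- ===== LEMMAS AND PROOFS =====

-- the two variants generated for a span (s, e)
def pvVar (tokens : List String) (se : Nat × Nat) : List (List String) :=
  let run := (tokens.drop se.1).take (se.2 - se.1)
  [tokens.take se.1 ++ [PySem.Str.join "" run] ++ tokens.drop se.2,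
   tokens.take se.1 ++ [PySem.Str.join "." run ++ "."] ++ tokens.drop se.2]

-- the spans A's outer loop processes starting from idx
def pvSpans (tokens : List String) (idx : Nat) : List (Nat × Nat) :=
  if h : idx < tokens.length then
    if ¬ pvIsInit tokens[idx] then pvSpans tokens (idx + 1)
    else
      let e := pvFindEnd tokens (idx + 1)
      if e - idx ≥ 2 then (idx, e) :: pvSpans tokens e else pvSpans tokens e
  else []
termination_by tokens.length - idx
decreasing_by all_goals (have := pvFindEnd_ge tokens (idx + 1); omega)

-- "s starts a maximal run of length >= 2" — what B's predicate amounts to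
def pvGood (tokens : List String) (s : Nat) : Bool :=
  decide (s < tokens.length) && pvIsInit (tokens.getD s "") &&
    (s == 0 || !pvIsInit (tokens.getD (s - 1) "")) &&
    decide (s + 2 ≤ pvFindEnd tokens (s + 1))

def pvGoodF (tokens : List String) (s : Nat) : Option (Nat × Nat) :=
  if pvGood tokens s then some (s, pvFindEnd tokens (s + 1)) else none

theorem pvGetD_eq (tokens : List String) (j : Nat) (hj : j < tokens.length) :
    tokens.getD j "" = tokens[j] := by
  simp [List.getD_eq_getElem?_getD, hj]

theorem pvFindEnd_step (tokens : List String) (k : Nat) (hk : k < tokens.length)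
    (hf : pvIsInit tokens[k] = true) : pvFindEnd tokens k = pvFindEnd tokens (k + 1) := by
  rw [pvFindEnd]; simp [hk, hf]

theorem pvFindEnd_stop_ge (tokens : List String) (k : Nat) (h : tokens.length ≤ k) :
    pvFindEnd tokens k = k := by
  rw [pvFindEnd]; rw [dif_neg (by omega)]

theorem pvFindEnd_stop_flag (tokens : List String) (k : Nat) (hk : k < tokens.length)
    (hf : pvIsInit tokens[k] = false) : pvFindEnd tokens k = k := by
  rw [pvFindEnd]; simp [hk, hf]

theorem pvFindEnd_le (tokens : List String) (k : Nat) (hk : k ≤ tokens.length) :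
    pvFindEnd tokens k ≤ tokens.length := by
  rw [pvFindEnd]
  split
  · split
    · exact pvFindEnd_le tokens (k + 1) (by omega)
    · omega
  · omega
termination_by tokens.length - k

-- every position in [k, findEnd k) is an initial
theorem pvFindEnd_all (tokens : List String) (k j : Nat) (h1 : k ≤ j)
    (h2 : j < pvFindEnd tokens k) : pvIsInit (tokens.getD j "") = true := by
  by_cases hk : k < tokens.length
  · by_cases hf : pvIsInit tokens[k] = true
    · rw [pvFindEnd_step tokens k hk hf] at h2
      rcases Nat.eq_or_lt_of_le h1 with rfl | hlt
      · rw [pvGetD_eq tokens k hk]; exact hf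
      · exact pvFindEnd_all tokens (k + 1) j hlt h2
    · rw [pvFindEnd_stop_flag tokens k hk (by simpa using hf)] at h2; omega
  · rw [pvFindEnd_stop_ge tokens k (by omega)] at h2; omega
termination_by tokens.length - k
decreasing_by omega

-- the stop position is the list's end or a non-initial (out of range reads the "" default)
theorem pvFindEnd_stop (tokens : List String) (k : Nat) :
    pvFindEnd tokens k = tokens.length ∨
      pvIsInit (tokens.getD (pvFindEnd tokens k) "") = false := by
  by_cases h : k < tokens.length
  · by_cases hf : pvIsInit tokens[k] = true
    · rw [pvFindEnd_step tokens k h hf]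
      exact pvFindEnd_stop tokens (k + 1)
    · rw [pvFindEnd_stop_flag tokens k h (by simpa using hf)]
      right
      rw [pvGetD_eq tokens k h]; simpa using hf
  · rw [pvFindEnd_stop_ge tokens k (by omega)]
    rcases Nat.eq_or_lt_of_le (Nat.le_of_not_lt h) with h' | h'
    · left; omega
    · right
      rw [List.getD_eq_default _ _ (by omega)]
      rfl
termination_by tokens.length - k
decreasing_by omega

-- converse: an all-initial segment with a proper right boundary is what findEnd finds
theorem pvFindEnd_of (tokens : List String) (k e : Nat) (hke : k ≤ e) (hen : e ≤ tokens.length)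
    (hall : ∀ j, k ≤ j → j < e → pvIsInit (tokens.getD j "") = true)
    (hstop : e = tokens.length ∨ pvIsInit (tokens.getD e "") = false) :
    pvFindEnd tokens k = e := by
  rcases Nat.eq_or_lt_of_le hke with rfl | hlt
  · by_cases h : k < tokens.length
    · rcases hstop with rfl | hf
      · omega
      · exact pvFindEnd_stop_flag tokens k h (by rw [pvGetD_eq tokens k h] at hf; exact hf)
    · exact pvFindEnd_stop_ge tokens k (by omega)
  · have hk : k < tokens.length := by omega
    have hik : pvIsInit tokens[k] = true := by
      have := hall k le_rfl hlt
      rwa [pvGetD_eq tokens k hk] at this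
    rw [pvFindEnd_step tokens k hk hik]
    exact pvFindEnd_of tokens (k + 1) e (by omega) hen (fun j h1 h2 => hall j (by omega) h2) hstop
termination_by e - k

theorem pvSpans_nil (tokens : List String) (k : Nat) (h : tokens.length ≤ k) :
    pvSpans tokens k = [] := by
  rw [pvSpans]; rw [dif_neg (by omega)]

theorem pvSpans_skip (tokens : List String) (k : Nat) (hk : k < tokens.length)
    (hf : pvIsInit tokens[k] = false) : pvSpans tokens k = pvSpans tokens (k + 1) := by
  rw [pvSpans]; simp [hk, hf]

theorem pvSpans_run (tokens : List String) (k : Nat) (hk : k < tokens.length)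
    (hf : pvIsInit tokens[k] = true) :
    pvSpans tokens k =
      if pvFindEnd tokens (k + 1) - k ≥ 2 then
        (k, pvFindEnd tokens (k + 1)) :: pvSpans tokens (pvFindEnd tokens (k + 1))
      else pvSpans tokens (pvFindEnd tokens (k + 1)) := by
  rw [pvSpans]; simp [hk, hf]

-- A's loop collects exactly the variants of its spans
theorem pvALoop_eq (tokens : List String) (idx : Nat) (out : List (List String)) :
    pvALoop tokens idx out = out ++ (pvSpans tokens idx).flatMap (pvVar tokens) := by
  rw [pvALoop]
  split
  · rename_i h
    split
    · rename_i hf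
      rw [pvALoop_eq tokens (idx + 1) out,
        pvSpans_skip tokens idx h (by simpa using hf)]
    · rename_i hf
      have hf' : pvIsInit tokens[idx] = true := by simpa using hf
      rw [pvSpans_run tokens idx h hf']
      by_cases h2 : pvFindEnd tokens (idx + 1) - idx ≥ 2
      · simp only [h2, if_pos]
        rw [pvALoop_eq tokens (pvFindEnd tokens (idx + 1))]
        simp [pvVar, List.append_assoc]
      · simp only [h2, if_false]
        rw [pvALoop_eq tokens (pvFindEnd tokens (idx + 1))]
  · simp [pvSpans_nil tokens idx (by omega)]
termination_by tokens.length - idx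
decreasing_by all_goals (have := pvFindEnd_ge tokens (idx + 1); omega)

-- the .all over the slice tokens[s:e] says every index in [s, e) is an initial
theorem pvSegAll (tokens : List String) (s e : Nat) (hen : e ≤ tokens.length) :
    (((tokens.drop s).take (e - s)).all pvIsInit = true) ↔
      ∀ j, s ≤ j → j < e → pvIsInit (tokens.getD j "") = true := by
  rw [List.all_eq_true]
  constructor
  · intro h j h1 h2
    have hj : j < tokens.length := by omega
    have hidx : j - s < ((tokens.drop s).take (e - s)).length := by
      simp [List.length_take, List.length_drop]; omega
    have hmem : ((tokens.drop s).take (e - s))[j - s] ∈ (tokens.drop s).take (e - s) :=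
      List.getElem_mem hidx
    have := h _ hmem
    rw [pvGetD_eq tokens j hj]
    have hget : ((tokens.drop s).take (e - s))[j - s] = tokens[j] := by
      rw [List.getElem_take, List.getElem_drop]
      congr 1; omega
    rwa [hget] at this
  · intro h x hx
    obtain ⟨i, hi, rfl⟩ := List.mem_iff_getElem.1 hx
    have hi' : i < e - s ∧ s + i < tokens.length := by
      simp [List.length_take, List.length_drop] at hi; omega
    rw [List.getElem_take, List.getElem_drop]
    have := h (s + i) (by omega) (by omega)
    rwa [pvGetD_eq tokens (s + i) (by omega)] at this

-- B's interval predicate holds exactly at the end of a good run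
theorem pvQual_eq (tokens : List String) (s e : Nat) (hs : s < tokens.length)
    (hse : s + 2 ≤ e) (hen : e ≤ tokens.length) :
    pvQual tokens tokens.length s e =
      (pvGood tokens s && (e == pvFindEnd tokens (s + 1))) := by
  by_cases hq : pvQual tokens tokens.length s e = true
  · have h := hq
    unfold pvQual at h
    rw [Bool.and_eq_true, Bool.and_eq_true] at h
    obtain ⟨⟨hl, hr⟩, hall⟩ := h
    have hall' := (pvSegAll tokens s e hen).1 hall
    rw [Bool.or_eq_true] at hr
    have hstop : e = tokens.length ∨ pvIsInit (tokens.getD e "") = false := by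
      rcases hr with h' | h'
      · left; exact beq_iff_eq.mp h'
      · right; rw [Bool.not_eq_true'] at h'; exact h'
    have hfe : pvFindEnd tokens (s + 1) = e :=
      pvFindEnd_of tokens (s + 1) e (by omega) hen
        (fun j h1 h2 => hall' j (by omega) h2) hstop
    have hgood : pvGood tokens s = true := by
      unfold pvGood
      simp only [Bool.and_eq_true, decide_eq_true_eq]
      refine ⟨⟨⟨hs, ?_⟩, hl⟩, by omega⟩
      exact hall' s le_rfl (by omega)
    rw [hq, hgood, hfe]; simp
  · rw [Bool.not_eq_true] at hq
    rw [hq]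
    by_cases hg : pvGood tokens s = true
    · rw [hg]
      have h := hg
      unfold pvGood at h
      simp only [Bool.and_eq_true, decide_eq_true_eq] at h
      obtain ⟨⟨⟨_, hini⟩, hl⟩, hfe2⟩ := h
      by_cases hee : e = pvFindEnd tokens (s + 1)
      · exfalso
        have hall' : ∀ j, s ≤ j → j < e → pvIsInit (tokens.getD j "") = true := by
          intro j h1 h2
          rcases Nat.eq_or_lt_of_le h1 with rfl | hlt
          · exact hini
          · exact pvFindEnd_all tokens (s + 1) j (by omega) (by omega)
        have hstop : e = tokens.length ∨ pvIsInit (tokens.getD e "") = false := by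
          rcases pvFindEnd_stop tokens (s + 1) with h' | h'
          · left; omega
          · right; rw [hee]; exact h'
        have hq' : pvQual tokens tokens.length s e = true := by
          unfold pvQual
          rw [Bool.and_eq_true, Bool.and_eq_true]
          refine ⟨⟨hl, ?_⟩, (pvSegAll tokens s e hen).2 hall'⟩
          rcases hstop with h' | h'
          · rw [h']; simp
          · rw [h']; simp
        rw [hq] at hq'; exact absurd hq' (by simp)
      · have : (e == pvFindEnd tokens (s + 1)) = false := by
          simp [hee]
        rw [this]; simp
    · rw [Bool.not_eq_true] at hg
      rw [hg]; simp

-- the inner fold collects the variants of the qualifying interval ends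
theorem pvInner_eq (tokens : List String) (n s : Nat) (l : List Nat)
    (acc : List (List String)) :
    l.foldl
      (fun out e =>
        if pvQual tokens n s e then
          let run := (tokens.drop s).take (e - s)
          (out ++ [tokens.take s ++ [PySem.Str.join "" run] ++ tokens.drop e]) ++
            [tokens.take s ++ [PySem.Str.join "." run ++ "."] ++ tokens.drop e]
        else out) acc
      = acc ++ (l.filter (pvQual tokens n s)).flatMap (fun e => pvVar tokens (s, e)) := by
  induction l generalizing acc with
  | nil => simp
  | cons x xs ih =>
    simp only [List.foldl_cons]
    by_cases hx : pvQual tokens n s x = true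
    · rw [if_pos hx, ih]
      simp [hx, pvVar, List.append_assoc]
    · rw [Bool.not_eq_true] at hx
      rw [if_neg (by simp [hx]), ih]
      simp [hx]

-- the qualifying ends for a fixed s: exactly findEnd when s is good
theorem pvFilter_eq (tokens : List String) (s : Nat) (hs : s < tokens.length) :
    (List.range' (s + 2) (tokens.length + 1 - (s + 2))).filter
        (pvQual tokens tokens.length s) =
      if pvGood tokens s then [pvFindEnd tokens (s + 1)] else [] := by
  have hcong : ∀ e ∈ List.range' (s + 2) (tokens.length + 1 - (s + 2)),
      pvQual tokens tokens.length s e =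
        (pvGood tokens s && (e == pvFindEnd tokens (s + 1))) := by
    intro e he
    have hb := List.mem_range'_1.1 he
    exact pvQual_eq tokens s e hs (by omega) (by omega)
  rw [List.filter_congr hcong]
  by_cases hg : pvGood tokens s = true
  · simp only [hg, Bool.true_and, if_pos]
    set e0 := pvFindEnd tokens (s + 1) with he0
    have hge : s + 2 ≤ e0 := by
      have h := hg
      unfold pvGood at h
      simp only [Bool.and_eq_true, decide_eq_true_eq] at h
      omega
    have hle : e0 ≤ tokens.length := pvFindEnd_le tokens (s + 1) (by omega)
    have hmem : e0 ∈ List.range' (s + 2) (tokens.length + 1 - (s + 2)) := by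
      rw [List.mem_range'_1]; omega
    rw [List.filter_beq]
    rw [List.count_eq_one_of_mem (List.nodup_range') hmem]
    rfl
  · rw [Bool.not_eq_true] at hg
    simp [hg]

-- per-start contribution of B
def pvG (tokens : List String) (s : Nat) : List (List String) :=
  if pvGood tokens s then pvVar tokens (s, pvFindEnd tokens (s + 1)) else []

theorem pvOuter_eq (tokens : List String) (l : List Nat) (acc : List (List String))
    (hl : ∀ s ∈ l, s < tokens.length) :
    l.foldl
      (fun out s =>
        (List.range' (s + 2) (tokens.length + 1 - (s + 2))).foldl
          (fun out e =>
            if pvQual tokens tokens.length s e then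
              let run := (tokens.drop s).take (e - s)
              (out ++ [tokens.take s ++ [PySem.Str.join "" run] ++ tokens.drop e]) ++
                [tokens.take s ++ [PySem.Str.join "." run ++ "."] ++ tokens.drop e]
            else out)
          out) acc
      = acc ++ l.flatMap (pvG tokens) := by
  induction l generalizing acc with
  | nil => simp
  | cons x xs ih =>
    simp only [List.foldl_cons, List.flatMap_cons]
    rw [pvInner_eq, pvFilter_eq tokens x (hl x (by simp)),
      ih _ (fun s hs => hl s (by simp [hs]))]
    by_cases hg : pvGood tokens x = true
    · simp [pvG, hg, List.append_assoc]
    · rw [Bool.not_eq_true] at hg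
      simp [pvG, hg]

theorem pvFlatMap_goodF (tokens : List String) (l : List Nat) :
    l.flatMap (pvG tokens) = (l.filterMap (pvGoodF tokens)).flatMap (pvVar tokens) := by
  induction l with
  | nil => simp
  | cons x xs ih =>
    simp only [List.flatMap_cons, List.filterMap_cons]
    by_cases hg : pvGood tokens x = true
    · simp [pvG, pvGoodF, hg, ih]
    · rw [Bool.not_eq_true] at hg
      simp [pvG, pvGoodF, hg, ih]

-- skipping positions that are not good leaves the filterMap unchanged
theorem pvFilterMap_skip (tokens : List String) (m e : Nat) (hme : m ≤ e)
    (hen : e ≤ tokens.length)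
    (h : ∀ j, m ≤ j → j < e → pvGood tokens j = false) :
    (List.range' m (tokens.length - m)).filterMap (pvGoodF tokens) =
      (List.range' e (tokens.length - e)).filterMap (pvGoodF tokens) := by
  rcases Nat.eq_or_lt_of_le hme with rfl | hlt
  · rfl
  · have hm : tokens.length - m = (tokens.length - (m + 1)) + 1 := by omega
    rw [hm, List.range'_succ, List.filterMap_cons]
    have hgm : pvGoodF tokens m = none := by
      simp [pvGoodF, h m le_rfl hlt]
    rw [hgm]
    exact pvFilterMap_skip tokens (m + 1) e (by omega) hen
      (fun j h1 h2 => h j (by omega) h2)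
termination_by e - m

-- invariant at the entry of A's outer loop: never in the middle of a run
def pvLeftOK (tokens : List String) (k : Nat) : Prop :=
  k = 0 ∨ tokens.length ≤ k ∨ pvIsInit (tokens.getD (k - 1) "") = false ∨
    pvIsInit (tokens.getD k "") = false

-- A's spans are exactly the good starts with their run ends
theorem pvSpans_char (tokens : List String) (d k : Nat) (hd : tokens.length - k ≤ d)
    (hL : pvLeftOK tokens k) :
    pvSpans tokens k = (List.range' k (tokens.length - k)).filterMap (pvGoodF tokens) := by
  induction d generalizing k with
  | zero =>
    have hk : tokens.length ≤ k := by omega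
    rw [pvSpans_nil tokens k hk]
    have : tokens.length - k = 0 := by omega
    rw [this]; rfl
  | succ d ih =>
    by_cases hk : k < tokens.length
    · have hm : tokens.length - k = (tokens.length - (k + 1)) + 1 := by omega
      by_cases hf : pvIsInit tokens[k] = true
      · have hini : pvIsInit (tokens.getD k "") = true := by
          rw [pvGetD_eq tokens k hk]; exact hf
        have hleft : (k == 0 || !pvIsInit (tokens.getD (k - 1) "")) = true := by
          rcases hL with h' | h' | h' | h'
          · rw [h']; rfl
          · omega
          · rw [h']; simp
          · rw [hini] at h'; exact absurd h' (by simp)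
        set e := pvFindEnd tokens (k + 1) with hee
        have hfe_ge : k + 1 ≤ e := pvFindEnd_ge tokens (k + 1)
        have hfe_le : e ≤ tokens.length := pvFindEnd_le tokens (k + 1) (by omega)
        have hLe : pvLeftOK tokens e := by
          rcases pvFindEnd_stop tokens (k + 1) with h' | h'
          · right; left; omega
          · right; right; right; exact h'
        rw [pvSpans_run tokens k hk hf]
        by_cases h2 : e - k ≥ 2
        · have hgood : pvGood tokens k = true := by
            unfold pvGood
            simp only [Bool.and_eq_true, decide_eq_true_eq]
            exact ⟨⟨⟨hk, hini⟩, hleft⟩, by omega⟩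
          rw [if_pos h2, hm, List.range'_succ, List.filterMap_cons]
          have : pvGoodF tokens k = some (k, e) := by
            unfold pvGoodF; rw [if_pos hgood, hee]
          rw [this]
          have hskip : (List.range' (k + 1) (tokens.length - (k + 1))).filterMap
              (pvGoodF tokens) =
              (List.range' e (tokens.length - e)).filterMap (pvGoodF tokens) := by
            apply pvFilterMap_skip tokens (k + 1) e (by omega) hfe_le
            intro j h1 hj2
            have hprev : pvIsInit (tokens.getD (j - 1) "") = true := by
              rcases Nat.eq_or_lt_of_le h1 with h1' | h1'
              · have : j - 1 = k := by omega
                rw [this]; exact hini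
              · exact pvFindEnd_all tokens (k + 1) (j - 1) (by omega) (by omega)
            have hj0 : (j == 0) = false := by simp; omega
            unfold pvGood
            rw [hprev, hj0]
            simp
          rw [hskip, ih e (by omega) hLe]
        · have e1 : e = k + 1 := by omega
          rw [if_neg h2]
          have hgood : pvGood tokens k = false := by
            unfold pvGood
            simp only [Bool.and_eq_false_iff]
            right
            simp only [decide_eq_false_iff_not]
            omega
          rw [hm, List.range'_succ, List.filterMap_cons]
          have hnone : pvGoodF tokens k = none := by simp [pvGoodF, hgood]
          rw [hnone]
          show pvSpans tokens e =
            List.filterMap (pvGoodF tokens) (List.range' (k + 1) (tokens.length - (k + 1)))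
          rw [e1]
          exact ih (k + 1) (by omega) (e1 ▸ hLe)
      · rw [Bool.not_eq_true] at hf
        rw [pvSpans_skip tokens k hk hf]
        have hgood : pvGood tokens k = false := by
          have h0 : pvIsInit (tokens.getD k "") = false := by
            rw [pvGetD_eq tokens k hk]; exact hf
          unfold pvGood
          rw [h0]
          simp
        rw [hm, List.range'_succ, List.filterMap_cons]
        have : pvGoodF tokens k = none := by simp [pvGoodF, hgood]
        rw [this]
        apply ih (k + 1) (by omega)
        right; right; left
        have : k + 1 - 1 = k := by omega
        rw [this, pvGetD_eq tokens k hk]; exact hf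
    · rw [pvSpans_nil tokens k (by omega)]
      have : tokens.length - k = 0 := by omega
      rw [this]; rfl

-- ===== VERDICT (by name: the statement is the Claim_ definition above) =====
theorem single_letter_run_variants_py_spec : Claim_equal_single_letter_run_variants_py := by
  intro tokens _
  unfold Spec_single_letter_run_variants_py single_letter_run_variants_py
    single_letter_run_variants_py_alt
  rw [pvALoop_eq]
  simp only [List.nil_append]
  rw [pvOuter_eq tokens (List.range tokens.length) [] (fun s hs => List.mem_range.1 hs)]
  rw [List.nil_append, pvFlatMap_goodF]
  rw [pvSpans_char tokens tokens.length 0 (by omega) (Or.inl rfl)]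
  rw [List.range_eq_range']
  simp
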